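-- pv_equiv track=rewrite | github.com/sergiorgiraldo/Python-lang | data-engineering-interview-patterns/patterns/06_graph_topological_sort/de_scenarios/impact_analysis.py | find_upstream
-- ===== SOURCE A (Python) =====
-- from collections import defaultdict, deque
--
-- def find_upstream(lineage: dict[str, list[str]], table: str) -> list[str]:
--     """
--     Find all tables upstream of a given table (its dependencies).
--
--     Traverses the graph backward.
--     """
--     reverse: dict[str, list[str]] = defaultdict(list)
--     for src, targets in lineage.items():
--         for target in targets:
--             reverse[target].append(src)
--
--     visited: set[str] = set()
--     queue = deque([table])
--     visited.add(table)
--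
--     while queue:
--         node = queue.popleft()
--         for neighbor in reverse.get(node, []):
--             if neighbor not in visited:
--                 visited.add(neighbor)
--                 queue.append(neighbor)
--
--     return sorted(t for t in visited if t != table)
-- ===== SOURCE B (Python) =====
-- def find_upstream(lineage: dict[str, list[str]], table: str) -> list[str]:
--     """
--     Find all tables upstream of a given table (its dependencies).
--
--     Recursive depth-first traversal of the reversed graph.
--     """
--     reverse: dict[str, list[str]] = {}
--     for src, targets in lineage.items():
--         for target in targets:
--             reverse.setdefault(target, []).append(src)
--
--     visited: set[str] = {table}
--
--     def dfs(node: str) -> None: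
--         for neighbor in reverse.get(node, []):
--             if neighbor not in visited:
--                 visited.add(neighbor)
--                 dfs(neighbor)
--
--     dfs(table)
--     return sorted(t for t in visited if t != table)
-- ===== Notes on version B (the rewrite author's own statement) =====
-- stated objective: alternative
-- what changed: Keeps the reverse-graph construction and sorted output but replaces the iterative deque-based BFS with a recursive depth-first traversal (a nested dfs helper recursing over reverse.get(node, []) with a visited set seeded with table).
import Mathlib
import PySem

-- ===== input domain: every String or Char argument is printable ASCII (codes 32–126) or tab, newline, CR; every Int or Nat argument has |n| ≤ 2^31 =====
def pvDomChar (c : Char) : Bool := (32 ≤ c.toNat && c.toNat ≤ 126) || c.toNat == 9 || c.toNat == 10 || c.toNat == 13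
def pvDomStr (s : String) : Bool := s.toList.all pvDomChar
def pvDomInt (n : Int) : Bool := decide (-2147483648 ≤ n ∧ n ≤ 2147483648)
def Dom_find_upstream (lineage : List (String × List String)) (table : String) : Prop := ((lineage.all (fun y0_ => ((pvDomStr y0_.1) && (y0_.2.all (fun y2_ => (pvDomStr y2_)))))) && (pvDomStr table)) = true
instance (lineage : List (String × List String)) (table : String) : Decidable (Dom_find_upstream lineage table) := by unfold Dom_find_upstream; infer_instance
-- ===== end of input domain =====

-- B replaces A's FIFO-queue BFS over the reversed lineage graph by a recursive DFS
-- (same reverse-graph construction, same sorted output); objective: alternative, not faster.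

-- ===== PORT A =====
-- shared helper (identical code in both Pythons): build the reversed adjacency dict
-- 'for src, targets in lineage.items(): for target in targets: reverse[target].append(src)'
def pvBuildReverse (lineage : List (String × List String)) : PySem.Dict String (List String) :=
  (PySem.Dict.ofList lineage).items.foldl
    (fun rev p => p.2.foldl
      (fun rev target => PySem.Dict.modify rev target [] (fun srcs => srcs ++ [p.1])) rev)
    PySem.Dict.empty

-- the 'while queue:' loop; fuel is a totality guard only (it never runs out: each
-- iteration either shortens the queue or enlarges the nodup visited set, which is
-- bounded by the number of dict entries + 1 = the initial fuel)
def pvBfsLoop (rev : PySem.Dict String (List String)) : Nat → PySem.Set String → List String → PySem.Set String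
  | 0, visited, _ => visited
  | _+1, visited, [] => visited
  | fuel+1, visited, node :: rest =>
      pvBfsLoop rev fuel
        ((PySem.Dict.getD rev node []).foldl
          (fun (st : PySem.Set String × List String) neighbor =>
            if PySem.Set.contains st.1 neighbor then st
            else (PySem.Set.add st.1 neighbor, st.2 ++ [neighbor]))
          (visited, rest)).1
        ((PySem.Dict.getD rev node []).foldl
          (fun (st : PySem.Set String × List String) neighbor =>
            if PySem.Set.contains st.1 neighbor then st
            else (PySem.Set.add st.1 neighbor, st.2 ++ [neighbor]))
          (visited, rest)).2

def find_upstream (lineage : List (String × List String)) (table : String) : List String :=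
  let rev := pvBuildReverse lineage
  let visited0 : PySem.Set String := PySem.Set.add PySem.Set.empty table
  let visited := pvBfsLoop rev ((PySem.Dict.ofList lineage).items.length + 1) visited0 [table]
  PySem.List.sorted (visited.filter (fun t => t != table)) (fun t => t) false

-- ===== PORT B =====
-- the 'for neighbor in reverse.get(node, []):' loop of dfs; the recursive call is the
-- closure 'dfs' passed in as a function
def pvDfsList (dfs : PySem.Set String → String → PySem.Set String) : PySem.Set String → List String → PySem.Set String
  | visited, [] => visited
  | visited, neighbor :: rest =>
      pvDfsList dfs
        (if PySem.Set.contains visited neighbor then visited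
         else dfs (PySem.Set.add visited neighbor) neighbor)
        rest

-- 'def dfs(node): …'; fuel is a totality guard only (recursion depth is bounded by the
-- nodup visited set, which grows before every recursive call)
def pvDfsGo (rev : PySem.Dict String (List String)) : Nat → PySem.Set String → String → PySem.Set String
  | 0, visited, _ => visited
  | fuel+1, visited, node => pvDfsList (pvDfsGo rev fuel) visited (PySem.Dict.getD rev node [])

def find_upstream_alt (lineage : List (String × List String)) (table : String) : List String :=
  let rev := pvBuildReverse lineage
  let visited0 : PySem.Set String := PySem.Set.ofList [table]
  let visited := pvDfsGo rev ((PySem.Dict.ofList lineage).items.length + 1) visited0 table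
  PySem.List.sorted (visited.filter (fun t => t != table)) (fun t => t) false

-- ===== PRECONDITION & SPEC =====
def Spec_find_upstream (lineage : List (String × List String)) (table : String) (out : List String) : Prop := out = find_upstream_alt lineage table
instance (lineage : List (String × List String)) (table : String) (out : List String) : Decidable (Spec_find_upstream lineage table out) := by unfold Spec_find_upstream; infer_instance

-- ===== CLAIM (what is proved, stated in full; the proofs are below) =====
def Claim_equal_find_upstream : Prop := ∀ (lineage : List (String × List String)) (table : String), Dom_find_upstream lineage table → Spec_find_upstream lineage table (find_upstream lineage table)

-- ===== LEMMAS AND PROOFS =====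

theorem pv_len_le {l1 l2 : List String} (h : l1.Nodup) (hs : ∀ y ∈ l1, y ∈ l2) :
    l1.length ≤ l2.length :=
  (List.Nodup.subperm h (fun {y} hy => hs y hy)).length_le

-- every value stored in the reversed dict is a key of the original dict
theorem pv_mem_build (items : List (String × List String)) :
    ∀ (d : PySem.Dict String (List String)) (c x : String),
      x ∈ PySem.Dict.getD
            (items.foldl (fun rev p => p.2.foldl
               (fun rev target => PySem.Dict.modify rev target [] (fun srcs => srcs ++ [p.1])) rev) d)
            c []
      → x ∈ PySem.Dict.getD d c [] ∨ x ∈ items.map Prod.fst := by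
  induction items with
  | nil => intro d c x h; exact Or.inl h
  | cons p rest ih =>
    intro d c x h
    simp only [List.foldl_cons] at h
    rcases ih _ c x h with h' | h'
    · have heq : p.2.foldl
          (fun rev target => PySem.Dict.modify rev target [] (fun srcs => srcs ++ [p.1])) d
          = (p.2.map (fun t => (t, p.1))).foldl
              (fun d q => PySem.Dict.modify d q.1 [] (fun srcs => srcs ++ [q.2])) d := by
        rw [List.foldl_map]
      rw [heq, PySem.Dict.getD_foldl_modify_append] at h'
      rcases List.mem_append.mp h' with h2 | h2
      · exact Or.inl h2
      · right
        rcases List.mem_map.mp h2 with ⟨q, hq, rfl⟩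
        rcases List.mem_map.mp (List.mem_filter.mp hq).1 with ⟨t, _, rfl⟩
        simp
    · exact Or.inr (by simp [h'])

theorem pv_mem_rev (lineage : List (String × List String)) (c x : String)
    (h : x ∈ PySem.Dict.getD (pvBuildReverse lineage) c []) :
    x ∈ (PySem.Dict.ofList lineage).items.map Prod.fst := by
  unfold pvBuildReverse at h
  rcases pv_mem_build (PySem.Dict.ofList lineage).items PySem.Dict.empty c x h with h' | h'
  · rw [PySem.Dict.getD_empty] at h'
    simp at h'
  · exact h'

-- the inner 'for neighbor in …' loop of the BFS appends the fresh neighbors to both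
-- the visited set and the queue
theorem pv_bfs_inner (nbrs : List String) :
    ∀ (vis q : PySem.Set String), vis.Nodup →
    ∃ new : List String,
      nbrs.foldl
        (fun (st : PySem.Set String × List String) neighbor =>
          if PySem.Set.contains st.1 neighbor then st
          else (PySem.Set.add st.1 neighbor, st.2 ++ [neighbor]))
        (vis, q)
      = (vis ++ new, q ++ new)
      ∧ (vis ++ new).Nodup
      ∧ (∀ y ∈ new, y ∈ nbrs)
      ∧ (∀ y ∈ nbrs, y ∈ vis ++ new) := by
  induction nbrs with
  | nil =>
    intro vis q hnd
    exact ⟨[], by simp, by simpa using hnd, by simp, by simp⟩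
  | cons nb rest ih =>
    intro vis q hnd
    simp only [List.foldl_cons]
    by_cases hmem : nb ∈ vis
    · rw [if_pos ((PySem.Set.contains_iff _ _).mpr hmem)]
      rcases ih vis q hnd with ⟨new, he, hn, hsub, hcov⟩
      refine ⟨new, he, hn, fun y hy => List.mem_cons_of_mem _ (hsub y hy), fun y hy => ?_⟩
      rcases List.mem_cons.mp hy with rfl | hy'
      · exact List.mem_append.mpr (Or.inl hmem)
      · exact hcov y hy'
    · rw [if_neg (fun hc => hmem ((PySem.Set.contains_iff _ _).mp hc)),
          PySem.Set.add_of_not_mem hmem]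
      have hnd' : (vis ++ [nb]).Nodup := by
        rw [List.nodup_append]
        refine ⟨hnd, by simp, ?_⟩
        intro a ha b hb
        rw [List.mem_singleton] at hb
        subst hb
        exact fun hEq => hmem (hEq ▸ ha)
      rcases ih (vis ++ [nb]) (q ++ [nb]) hnd' with ⟨new, he, hn, hsub, hcov⟩
      refine ⟨nb :: new, ?_, ?_, ?_, ?_⟩
      · rw [he]; simp
      · simpa using hn
      · intro y hy
        rcases List.mem_cons.mp hy with rfl | hy'
        · exact List.mem_cons_self ..
        · exact List.mem_cons_of_mem _ (hsub y hy')
      · intro y hy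
        rcases List.mem_cons.mp hy with rfl | hy'
        · simp
        · simpa using hcov y hy'

theorem pv_bfs_subset (rev : PySem.Dict String (List String)) :
    ∀ (fuel : Nat) (vis : PySem.Set String) (q : List String), vis.Nodup →
      ∀ x ∈ vis, x ∈ pvBfsLoop rev fuel vis q := by
  intro fuel
  induction fuel with
  | zero => intro vis q _ x hx; simpa [pvBfsLoop] using hx
  | succ fuel ih =>
    intro vis q hnd x hx
    cases q with
    | nil => simpa [pvBfsLoop] using hx
    | cons node rest =>
      rcases pv_bfs_inner (PySem.Dict.getD rev node []) vis rest hnd with ⟨new, he, hn, _, _⟩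
      simp only [pvBfsLoop]
      rw [he]
      exact ih (vis ++ new) (rest ++ new) hn x (List.mem_append.mpr (Or.inl hx))

theorem pv_bfs_nodup (rev : PySem.Dict String (List String)) :
    ∀ (fuel : Nat) (vis : PySem.Set String) (q : List String), vis.Nodup →
      (pvBfsLoop rev fuel vis q).Nodup := by
  intro fuel
  induction fuel with
  | zero => intro vis q hnd; simpa [pvBfsLoop] using hnd
  | succ fuel ih =>
    intro vis q hnd
    cases q with
    | nil => simpa [pvBfsLoop] using hnd
    | cons node rest =>
      rcases pv_bfs_inner (PySem.Dict.getD rev node []) vis rest hnd with ⟨new, he, hn, _, _⟩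
      simp only [pvBfsLoop]
      rw [he]
      exact ih (vis ++ new) (rest ++ new) hn

theorem pv_bfs_sound (rev : PySem.Dict String (List String)) :
    ∀ (fuel : Nat) (vis : PySem.Set String) (q : List String), vis.Nodup →
      ∀ x ∈ pvBfsLoop rev fuel vis q,
        x ∈ vis ∨ ∃ u ∈ q, Relation.ReflTransGen (fun a b => b ∈ PySem.Dict.getD rev a []) u x := by
  intro fuel
  induction fuel with
  | zero => intro vis q _ x hx; exact Or.inl (by simpa [pvBfsLoop] using hx)
  | succ fuel ih =>
    intro vis q hnd x hx
    cases q with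
    | nil => exact Or.inl (by simpa [pvBfsLoop] using hx)
    | cons node rest =>
      rcases pv_bfs_inner (PySem.Dict.getD rev node []) vis rest hnd with ⟨new, he, hn, hsub, _⟩
      simp only [pvBfsLoop] at hx
      rw [he] at hx
      rcases ih (vis ++ new) (rest ++ new) hn x hx with hv | ⟨u, hu, hr⟩
      · rcases List.mem_append.mp hv with h | h
        · exact Or.inl h
        · exact Or.inr ⟨node, by simp, Relation.ReflTransGen.single (hsub x h)⟩
      · rcases List.mem_append.mp hu with h | h
        · exact Or.inr ⟨u, by simp [h], hr⟩
        · exact Or.inr ⟨node, by simp, Relation.ReflTransGen.head (hsub u h) hr⟩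

theorem pv_bfs_closed (rev : PySem.Dict String (List String)) (U : List String)
    (hU : ∀ c y, y ∈ PySem.Dict.getD rev c [] → y ∈ U) :
    ∀ (fuel : Nat) (vis : PySem.Set String) (q : List String),
      vis.Nodup → (∀ y ∈ vis, y ∈ U) → (∀ u ∈ q, u ∈ vis) →
      (∀ u ∈ vis, u ∉ q → ∀ v ∈ PySem.Dict.getD rev u [], v ∈ vis) →
      U.length - vis.length + q.length ≤ fuel →
      ∀ u ∈ pvBfsLoop rev fuel vis q, ∀ v ∈ PySem.Dict.getD rev u [], v ∈ pvBfsLoop rev fuel vis q := by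
  intro fuel
  induction fuel with
  | zero =>
    intro vis q hnd hUvis hq hcl hfuel u hu v hv
    cases q with
    | nil =>
      simp only [pvBfsLoop] at hu ⊢
      exact hcl u hu (by simp) v hv
    | cons node rest =>
      exfalso
      simp only [List.length_cons] at hfuel
      omega
  | succ fuel ih =>
    intro vis q hnd hUvis hq hcl hfuel u hu v hv
    cases q with
    | nil =>
      simp only [pvBfsLoop] at hu ⊢
      exact hcl u hu (by simp) v hv
    | cons node rest =>
      rcases pv_bfs_inner (PySem.Dict.getD rev node []) vis rest hnd with ⟨new, he, hn, hsub, hcov⟩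
      have hUvis' : ∀ y ∈ vis ++ new, y ∈ U := by
        intro y hy
        rcases List.mem_append.mp hy with h | h
        · exact hUvis y h
        · exact hU node y (hsub y h)
      have hq' : ∀ u' ∈ rest ++ new, u' ∈ vis ++ new := by
        intro u' h
        rcases List.mem_append.mp h with h | h
        · exact List.mem_append.mpr (Or.inl (hq u' (by simp [h])))
        · exact List.mem_append.mpr (Or.inr h)
      have hcl' : ∀ u' ∈ vis ++ new, u' ∉ rest ++ new →
          ∀ v' ∈ PySem.Dict.getD rev u' [], v' ∈ vis ++ new := by
        intro u' hu' hnotin v' hv'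
        rcases List.mem_append.mp hu' with h | h
        · by_cases hun : u' = node
          · subst hun
            exact hcov v' hv'
          · have hnq : u' ∉ node :: rest := by
              intro hmem
              rcases List.mem_cons.mp hmem with h' | h'
              · exact hun h'
              · exact hnotin (List.mem_append.mpr (Or.inl h'))
            exact List.mem_append.mpr (Or.inl (hcl u' h hnq v' hv'))
        · exact absurd (List.mem_append.mpr (Or.inr h)) hnotin
      have hlen : (vis ++ new).length ≤ U.length := pv_len_le hn hUvis'
      have hfuel' : U.length - (vis ++ new).length + (rest ++ new).length ≤ fuel := by
        simp only [List.length_append, List.length_cons] at hfuel hlen ⊢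
        omega
      have hrec := ih (vis ++ new) (rest ++ new) hn hUvis' hq' hcl' hfuel'
      simp only [pvBfsLoop] at hu ⊢
      rw [he] at hu ⊢
      exact hrec u hu v hv

theorem pv_dfs_sound_list (rev : PySem.Dict String (List String))
    (dfs : PySem.Set String → String → PySem.Set String)
    (hdfs : ∀ vis node x, x ∈ dfs vis node →
      x ∈ vis ∨ Relation.ReflTransGen (fun a b => b ∈ PySem.Dict.getD rev a []) node x) :
    ∀ (nbrs : List String) (vis : PySem.Set String) (x : String),
      x ∈ pvDfsList dfs vis nbrs →
      x ∈ vis ∨ ∃ nb ∈ nbrs, Relation.ReflTransGen (fun a b => b ∈ PySem.Dict.getD rev a []) nb x := by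
  intro nbrs
  induction nbrs with
  | nil => intro vis x hx; exact Or.inl (by simpa [pvDfsList] using hx)
  | cons nb rest ih =>
    intro vis x hx
    simp only [pvDfsList] at hx
    by_cases hmem : nb ∈ vis
    · rw [if_pos ((PySem.Set.contains_iff _ _).mpr hmem)] at hx
      rcases ih vis x hx with h | ⟨u, hu, hr⟩
      · exact Or.inl h
      · exact Or.inr ⟨u, by simp [hu], hr⟩
    · rw [if_neg (fun hc => hmem ((PySem.Set.contains_iff _ _).mp hc))] at hx
      rcases ih _ x hx with h | ⟨u, hu, hr⟩
      · rcases hdfs _ _ x h with h' | h'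
        · rcases (PySem.Set.mem_add vis nb x).mp h' with h'' | rfl
          · exact Or.inl h''
          · exact Or.inr ⟨x, by simp, Relation.ReflTransGen.refl⟩
        · exact Or.inr ⟨nb, by simp, h'⟩
      · exact Or.inr ⟨u, by simp [hu], hr⟩

theorem pv_dfs_sound (rev : PySem.Dict String (List String)) :
    ∀ (fuel : Nat) (vis : PySem.Set String) (node x : String),
      x ∈ pvDfsGo rev fuel vis node →
      x ∈ vis ∨ Relation.ReflTransGen (fun a b => b ∈ PySem.Dict.getD rev a []) node x := by
  intro fuel
  induction fuel with
  | zero => intro vis node x hx; exact Or.inl (by simpa [pvDfsGo] using hx)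
  | succ fuel ih =>
    intro vis node x hx
    simp only [pvDfsGo] at hx
    rcases pv_dfs_sound_list rev (pvDfsGo rev fuel) (fun v n y => ih v n y)
        (PySem.Dict.getD rev node []) vis x hx with h | ⟨nb, hnb, hr⟩
    · exact Or.inl h
    · exact Or.inr (Relation.ReflTransGen.head hnb hr)

-- full DFS specification: result extends visited, stays nodup and inside the universe,
-- covers the processed node's neighbours, and every newly visited node is fully expanded
def PvGoSpec (rev : PySem.Dict String (List String)) (U : List String) (fuel : Nat) : Prop :=
  ∀ (vis : PySem.Set String) (node : String),
    vis.Nodup → (∀ y ∈ vis, y ∈ U) → U.length + 1 - vis.length ≤ fuel →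
    (∀ x ∈ vis, x ∈ pvDfsGo rev fuel vis node)
    ∧ (pvDfsGo rev fuel vis node).Nodup
    ∧ (∀ y ∈ pvDfsGo rev fuel vis node, y ∈ U)
    ∧ (∀ v ∈ PySem.Dict.getD rev node [], v ∈ pvDfsGo rev fuel vis node)
    ∧ (∀ u ∈ pvDfsGo rev fuel vis node, u ∉ vis →
        ∀ v ∈ PySem.Dict.getD rev u [], v ∈ pvDfsGo rev fuel vis node)

theorem pv_dfs_list_spec (rev : PySem.Dict String (List String)) (U : List String)
    (fuel : Nat) (hgo : PvGoSpec rev U fuel) :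
    ∀ (nbrs : List String), (∀ y ∈ nbrs, y ∈ U) →
    ∀ (vis : PySem.Set String), vis.Nodup → (∀ y ∈ vis, y ∈ U) →
      U.length - vis.length ≤ fuel →
      (∀ x ∈ vis, x ∈ pvDfsList (pvDfsGo rev fuel) vis nbrs)
      ∧ (pvDfsList (pvDfsGo rev fuel) vis nbrs).Nodup
      ∧ (∀ y ∈ pvDfsList (pvDfsGo rev fuel) vis nbrs, y ∈ U)
      ∧ (∀ v ∈ nbrs, v ∈ pvDfsList (pvDfsGo rev fuel) vis nbrs)
      ∧ (∀ u ∈ pvDfsList (pvDfsGo rev fuel) vis nbrs, u ∉ vis →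
          ∀ v ∈ PySem.Dict.getD rev u [], v ∈ pvDfsList (pvDfsGo rev fuel) vis nbrs) := by
  intro nbrs
  induction nbrs with
  | nil =>
    intro _ vis hnd hUvis _
    refine ⟨fun x hx => by simpa [pvDfsList] using hx, by simpa [pvDfsList] using hnd,
      fun y hy => hUvis y (by simpa [pvDfsList] using hy), by simp,
      fun u hu hnotin => absurd (by simpa [pvDfsList] using hu) hnotin⟩
  | cons nb rest ih =>
    intro hnbrs vis hnd hUvis hfuel
    by_cases hmem : nb ∈ vis
    · have hstep : pvDfsList (pvDfsGo rev fuel) vis (nb :: rest)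
          = pvDfsList (pvDfsGo rev fuel) vis rest := by
        simp only [pvDfsList]
        rw [if_pos ((PySem.Set.contains_iff _ _).mpr hmem)]
      rcases ih (fun y hy => hnbrs y (by simp [hy])) vis hnd hUvis hfuel with
        ⟨hsub, hndr, hUr, hcov, hclr⟩
      rw [hstep]
      refine ⟨hsub, hndr, hUr, fun v hv => ?_, hclr⟩
      rcases List.mem_cons.mp hv with rfl | hv'
      · exact hsub v hmem
      · exact hcov v hv'
    · have hstep : pvDfsList (pvDfsGo rev fuel) vis (nb :: rest)
          = pvDfsList (pvDfsGo rev fuel) (pvDfsGo rev fuel (PySem.Set.add vis nb) nb) rest := by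
        simp only [pvDfsList]
        rw [if_neg (fun hc => hmem ((PySem.Set.contains_iff _ _).mp hc))]
      have hadd : PySem.Set.add vis nb = vis ++ [nb] := PySem.Set.add_of_not_mem hmem
      have hnd1 : (PySem.Set.add vis nb).Nodup := by
        rw [hadd]
        rw [List.nodup_append]
        refine ⟨hnd, by simp, ?_⟩
        intro a ha b hb
        rw [List.mem_singleton] at hb
        subst hb
        exact fun hEq => hmem (hEq ▸ ha)
      have hU1 : ∀ y ∈ PySem.Set.add vis nb, y ∈ U := by
        intro y hy
        rcases (PySem.Set.mem_add vis nb y).mp hy with h | rfl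
        · exact hUvis y h
        · exact hnbrs y (by simp)
      have hlenvis : vis.length ≤ U.length := pv_len_le hnd hUvis
      have hlen1 : (PySem.Set.add vis nb).length = vis.length + 1 := by
        rw [hadd]; simp
      have hfuel1 : U.length + 1 - (PySem.Set.add vis nb).length ≤ fuel := by
        omega
      rcases hgo (PySem.Set.add vis nb) nb hnd1 hU1 hfuel1 with
        ⟨hsub2, hnd2, hU2, hcovnb, hcl2⟩
      have hlen2 : (PySem.Set.add vis nb).length ≤ (pvDfsGo rev fuel (PySem.Set.add vis nb) nb).length :=
        pv_len_le hnd1 hsub2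
      have hfuel2 : U.length - (pvDfsGo rev fuel (PySem.Set.add vis nb) nb).length ≤ fuel := by
        omega
      rcases ih (fun y hy => hnbrs y (by simp [hy]))
          (pvDfsGo rev fuel (PySem.Set.add vis nb) nb) hnd2 hU2 hfuel2 with
        ⟨hsub3, hnd3, hU3, hcov3, hcl3⟩
      rw [hstep]
      have hvisr : ∀ x ∈ vis, x ∈ pvDfsList (pvDfsGo rev fuel) (pvDfsGo rev fuel (PySem.Set.add vis nb) nb) rest := by
        intro x hx
        exact hsub3 x (hsub2 x ((PySem.Set.mem_add vis nb x).mpr (Or.inl hx)))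
      have hnbr : nb ∈ pvDfsList (pvDfsGo rev fuel) (pvDfsGo rev fuel (PySem.Set.add vis nb) nb) rest :=
        hsub3 nb (hsub2 nb ((PySem.Set.mem_add vis nb nb).mpr (Or.inr rfl)))
      refine ⟨hvisr, hnd3, hU3, fun v hv => ?_, fun u hu hnotin v hv => ?_⟩
      · rcases List.mem_cons.mp hv with rfl | hv'
        · exact hnbr
        · exact hcov3 v hv'
      · by_cases h2 : u ∈ pvDfsGo rev fuel (PySem.Set.add vis nb) nb
        · by_cases h1 : u ∈ PySem.Set.add vis nb
          · have hue : u = nb := by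
              rcases (PySem.Set.mem_add vis nb u).mp h1 with h' | h'
              · exact absurd h' hnotin
              · exact h'
            subst hue
            exact hsub3 v (hcovnb v hv)
          · exact hsub3 v (hcl2 u h2 h1 v hv)
        · exact hcl3 u hu h2 v hv

theorem pv_dfs_go_spec (rev : PySem.Dict String (List String)) (U : List String)
    (hU : ∀ c y, y ∈ PySem.Dict.getD rev c [] → y ∈ U) :
    ∀ fuel : Nat, PvGoSpec rev U fuel := by
  intro fuel
  induction fuel with
  | zero =>
    intro vis node hnd hUvis hfuel
    exfalso
    have := pv_len_le hnd hUvis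
    omega
  | succ fuel ih =>
    intro vis node hnd hUvis hfuel
    have hgoal := pv_dfs_list_spec rev U fuel ih (PySem.Dict.getD rev node [])
      (fun y hy => hU node y hy) vis hnd hUvis (by omega)
    simpa only [pvDfsGo] using hgoal

-- membership characterisation of both traversals: reachability in the reversed graph
theorem pv_visA_iff (lineage : List (String × List String)) (table : String) (x : String) :
    x ∈ pvBfsLoop (pvBuildReverse lineage) ((PySem.Dict.ofList lineage).items.length + 1)
          (PySem.Set.add PySem.Set.empty table) [table]
    ↔ Relation.ReflTransGen
        (fun a b => b ∈ PySem.Dict.getD (pvBuildReverse lineage) a []) table x := by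
  have hvis0 : (PySem.Set.add (PySem.Set.empty (α := String)) table) = [table] := by
    have : table ∉ (PySem.Set.empty (α := String)) := by simp [PySem.Set.empty]
    rw [PySem.Set.add_of_not_mem this]
    rfl
  have hnd0 : ([table] : List String).Nodup := by simp
  have hU : ∀ c y, y ∈ PySem.Dict.getD (pvBuildReverse lineage) c [] →
      y ∈ table :: (PySem.Dict.ofList lineage).items.map Prod.fst :=
    fun c y h => List.mem_cons_of_mem _ (pv_mem_rev lineage c y h)
  rw [hvis0]
  constructor
  · intro hx
    rcases pv_bfs_sound (pvBuildReverse lineage) _ [table] [table] hnd0 x hx with h | ⟨u, hu, hr⟩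
    · rcases List.mem_singleton.mp h with rfl
      exact Relation.ReflTransGen.refl
    · rcases List.mem_singleton.mp hu with rfl
      exact hr
  · intro hr
    induction hr with
    | refl => exact pv_bfs_subset (pvBuildReverse lineage) _ [table] [table] hnd0 table (by simp)
    | tail hab hbc ihx =>
      refine pv_bfs_closed (pvBuildReverse lineage)
        (table :: (PySem.Dict.ofList lineage).items.map Prod.fst) hU _ [table] [table]
        hnd0 (by simp) (by simp) ?_ ?_ _ ihx _ hbc
      · intro u hu hnotin
        exact absurd hu hnotin
      · simp only [List.length_cons, List.length_nil, List.length_map]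
        omega

theorem pv_visB_iff (lineage : List (String × List String)) (table : String) (x : String) :
    x ∈ pvDfsGo (pvBuildReverse lineage) ((PySem.Dict.ofList lineage).items.length + 1)
          (PySem.Set.ofList [table]) table
    ↔ Relation.ReflTransGen
        (fun a b => b ∈ PySem.Dict.getD (pvBuildReverse lineage) a []) table x := by
  have hvis0 : (PySem.Set.ofList [table]) = [table] :=
    PySem.Set.ofList_eq_self_of_nodup _ (by simp)
  have hnd0 : ([table] : List String).Nodup := by simp
  have hU : ∀ c y, y ∈ PySem.Dict.getD (pvBuildReverse lineage) c [] →
      y ∈ table :: (PySem.Dict.ofList lineage).items.map Prod.fst :=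
    fun c y h => List.mem_cons_of_mem _ (pv_mem_rev lineage c y h)
  rw [hvis0]
  have hspec := pv_dfs_go_spec (pvBuildReverse lineage)
    (table :: (PySem.Dict.ofList lineage).items.map Prod.fst) hU
    ((PySem.Dict.ofList lineage).items.length + 1) [table] table hnd0 (by simp)
    (by simp only [List.length_cons, List.length_nil, List.length_map]; omega)
  rcases hspec with ⟨hsub, hndr, _, hcovt, hcl⟩
  constructor
  · intro hx
    rcases pv_dfs_sound (pvBuildReverse lineage) _ [table] table x hx with h | h
    · rcases List.mem_singleton.mp h with rfl
      exact Relation.ReflTransGen.refl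
    · exact h
  · intro hr
    induction hr with
    | refl => exact hsub table (by simp)
    | tail hab hbc ihx =>
      rename_i b c
      by_cases hb : b ∈ ([table] : List String)
      · rcases List.mem_singleton.mp hb with rfl
        exact hcovt _ hbc
      · exact hcl b ihx hb _ hbc

theorem pv_visB_nodup (lineage : List (String × List String)) (table : String) :
    (pvDfsGo (pvBuildReverse lineage) ((PySem.Dict.ofList lineage).items.length + 1)
      (PySem.Set.ofList [table]) table).Nodup := by
  have hvis0 : (PySem.Set.ofList [table]) = [table] :=
    PySem.Set.ofList_eq_self_of_nodup _ (by simp)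
  have hU : ∀ c y, y ∈ PySem.Dict.getD (pvBuildReverse lineage) c [] →
      y ∈ table :: (PySem.Dict.ofList lineage).items.map Prod.fst :=
    fun c y h => List.mem_cons_of_mem _ (pv_mem_rev lineage c y h)
  rw [hvis0]
  exact (pv_dfs_go_spec (pvBuildReverse lineage)
    (table :: (PySem.Dict.ofList lineage).items.map Prod.fst) hU
    ((PySem.Dict.ofList lineage).items.length + 1) [table] table (by simp) (by simp)
    (by simp only [List.length_cons, List.length_nil, List.length_map]; omega)).2.1

-- ===== VERDICT (by name: the statement is the Claim_ definition above) =====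
theorem find_upstream_spec : Claim_equal_find_upstream := by
  intro lineage table _
  show PySem.List.sorted
      ((pvBfsLoop (pvBuildReverse lineage) ((PySem.Dict.ofList lineage).items.length + 1)
          (PySem.Set.add PySem.Set.empty table) [table]).filter (fun t => t != table))
      (fun t => t) false
    = PySem.List.sorted
      ((pvDfsGo (pvBuildReverse lineage) ((PySem.Dict.ofList lineage).items.length + 1)
          (PySem.Set.ofList [table]) table).filter (fun t => t != table))
      (fun t => t) false
  have hndA : (pvBfsLoop (pvBuildReverse lineage) ((PySem.Dict.ofList lineage).items.length + 1)
      (PySem.Set.add PySem.Set.empty table) [table]).Nodup := by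
    have hvis0 : (PySem.Set.add (PySem.Set.empty (α := String)) table) = [table] := by
      have : table ∉ (PySem.Set.empty (α := String)) := by simp [PySem.Set.empty]
      rw [PySem.Set.add_of_not_mem this]
      rfl
    rw [hvis0]
    exact pv_bfs_nodup _ _ [table] [table] (by simp)
  have hperm : (pvBfsLoop (pvBuildReverse lineage) ((PySem.Dict.ofList lineage).items.length + 1)
        (PySem.Set.add PySem.Set.empty table) [table]).Perm
      (pvDfsGo (pvBuildReverse lineage) ((PySem.Dict.ofList lineage).items.length + 1)
        (PySem.Set.ofList [table]) table) := by
    rw [List.perm_ext_iff_of_nodup hndA (pv_visB_nodup lineage table)]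
    intro a
    rw [pv_visA_iff, pv_visB_iff]
  exact PySem.List.sorted_eq_sorted_of_perm _ _ (fun t => t) (fun a b h => h)
    (hperm.filter (fun t => t != table))
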